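-- pv_equiv track=rewrite | github.com/Subhash-Saurabh/Genome-Assembling | Week 3/circulation.py | find
-- ===== SOURCE A (Python) =====
-- def find(parent,city,lst,min_path,edge_list):
--     if parent[city][0] != city:
--         lst.append(parent[city][1])
--         u,v,l,c = edge_list[parent[city][1]]
--         if c < min_path:
--             min_path = c
--         min_path = find(parent,parent[city][0],lst,min_path,edge_list)
--     return min_path
-- ===== SOURCE B (Python) =====
-- def find(parent, city, lst, min_path, edge_list):
--     # Iterative walk of the parent chain: same appends to lst, same min tracking.
--     while parent[city][0] != city:
--         edge = parent[city][1]
--         lst.append(edge)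
--         min_path = min(min_path, edge_list[edge][3])
--         city = parent[city][0]
--     return min_path
-- ===== Notes on version B (the rewrite author's own statement) =====
-- stated objective: idiomatic
-- what changed: The linear-chain recursion threading min_path through recursive calls is rewritten as a direct while loop that walks the parent chain in place, updating city and min_path iteratively.
import Mathlib
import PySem

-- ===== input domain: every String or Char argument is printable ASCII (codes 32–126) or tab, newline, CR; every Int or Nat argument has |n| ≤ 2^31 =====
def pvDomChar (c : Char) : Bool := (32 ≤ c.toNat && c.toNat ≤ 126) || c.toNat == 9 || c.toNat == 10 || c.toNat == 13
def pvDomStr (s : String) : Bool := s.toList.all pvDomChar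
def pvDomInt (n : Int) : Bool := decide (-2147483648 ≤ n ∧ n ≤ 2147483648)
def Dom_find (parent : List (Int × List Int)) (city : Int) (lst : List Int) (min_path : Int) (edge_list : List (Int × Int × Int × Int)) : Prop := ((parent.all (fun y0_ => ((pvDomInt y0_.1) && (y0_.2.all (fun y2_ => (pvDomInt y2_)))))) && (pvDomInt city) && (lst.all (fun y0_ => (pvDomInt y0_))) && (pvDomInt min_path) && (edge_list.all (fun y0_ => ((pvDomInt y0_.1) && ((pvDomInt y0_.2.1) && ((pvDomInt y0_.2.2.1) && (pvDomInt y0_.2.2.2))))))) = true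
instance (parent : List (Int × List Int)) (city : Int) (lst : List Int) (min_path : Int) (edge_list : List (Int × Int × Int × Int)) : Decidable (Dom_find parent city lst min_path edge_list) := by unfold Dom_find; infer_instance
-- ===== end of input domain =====

-- ===== PORT A =====
-- B rewrites A's linear-chain recursion as an iterative while loop (same append
-- order, same min tracking). Both Pythons append the same elements to lst; the
-- equivalence proved here is about the return value. Recursion depth is bounded
-- by parent.length + 1 on every input Pre_find admits; the fuel-out / raising
-- branches return 0 and are excluded by Pre_find.
def findA : Nat → List (Int × List Int) → Int → List Int → Int → List (Int × Int × Int × Int) → Int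
  | 0, _, _, _, _, _ => 0  -- RecursionError on a cyclic parent chain (outside Pre_find)
  | Nat.succ fuel, parent, city, lst, min_path, edge_list =>
    match (PySem.Dict.mk parent).get? city with
    | none => 0  -- parent[city] raises KeyError
    | some row =>
      match PySem.List.pyGet? row 0 with
      | none => 0  -- parent[city][0] raises IndexError
      | some p =>
        if p != city then
          match PySem.List.pyGet? row 1 with
          | none => 0  -- parent[city][1] raises IndexError
          | some e =>
            -- lst.append(parent[city][1])
            match PySem.List.pyGet? edge_list e with
            | none => 0  -- edge_list[parent[city][1]] raises IndexError
            | some (_u, _v, _l, c) =>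
              findA fuel parent p (lst ++ [e]) (if c < min_path then c else min_path) edge_list
        else min_path

def find (parent : List (Int × List Int)) (city : Int) (lst : List Int) (min_path : Int) (edge_list : List (Int × Int × Int × Int)) : Int :=
  findA (parent.length + 1) parent city lst min_path edge_list

-- ===== PORT B =====
-- the while loop of Source B: state (city, lst, min_path); none = an exception / fuel out
def findLoopB (parent : PySem.Dict Int (List Int)) (edge_list : List (Int × Int × Int × Int)) : Nat → Int → List Int → Int → Option Int
  | 0, _, _, _ => none  -- cyclic chain: the while loop never exits (outside Pre_find)
  | Nat.succ fuel, city, lst, min_path =>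
    match ((parent.get? city).bind (fun row => PySem.List.pyGet? row 0)) with  -- parent[city][0]
    | none => none
    | some p =>
      if p == city then some min_path  -- loop condition false: return min_path
      else
        match ((parent.get? city).bind (fun row => PySem.List.pyGet? row 1)) with  -- edge = parent[city][1]
        | none => none
        | some edge =>
          -- lst.append(edge); min_path = min(min_path, edge_list[edge][3]); city = parent[city][0]
          match ((PySem.List.pyGet? edge_list edge).map (fun t => t.2.2.2)) with
          | none => none
          | some c => findLoopB parent edge_list fuel p (lst ++ [edge]) (min min_path c)

def find_alt (parent : List (Int × List Int)) (city : Int) (lst : List Int) (min_path : Int) (edge_list : List (Int × Int × Int × Int)) : Int :=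
  (findLoopB (PySem.Dict.mk parent) edge_list (parent.length + 1) city lst min_path).getD 0

-- ===== PRECONDITION & SPEC =====
-- Pre_find admits exactly the inputs on which the Python A returns: following the
-- parent chain from city, every visited key is present with a list of length ≥ 1
-- (≥ 2 plus a valid edge_list index on non-final steps) and a fixed point
-- parent[c][0] == c is reached; otherwise A raises (KeyError, IndexError, or
-- RecursionError on a cycle — a terminating chain takes at most parent.length steps).
def chainOk (parent : List (Int × List Int)) (edge_list : List (Int × Int × Int × Int)) : Nat → Int → Bool
  | 0, _ => false
  | Nat.succ fuel, city =>
    match (PySem.Dict.mk parent).get? city with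
    | none => false
    | some row =>
      match PySem.List.pyGet? row 0 with
      | none => false
      | some p =>
        if p == city then true
        else
          match PySem.List.pyGet? row 1 with
          | none => false
          | some e => (PySem.List.pyGet? edge_list e).isSome && chainOk parent edge_list fuel p

def Pre_find (parent : List (Int × List Int)) (city : Int) (lst : List Int) (min_path : Int) (edge_list : List (Int × Int × Int × Int)) : Prop :=
  chainOk parent edge_list (parent.length + 1) city = true
instance (parent : List (Int × List Int)) (city : Int) (lst : List Int) (min_path : Int) (edge_list : List (Int × Int × Int × Int)) : Decidable (Pre_find parent city lst min_path edge_list) := by unfold Pre_find; infer_instance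
def pvWitness_find : (List (Int × List Int)) × Int × List Int × Int × (List (Int × Int × Int × Int)) :=
  ([(3, [1, 0]), (1, [1, 7])], 3, [], 5, [(3, 1, 2, 4)])

def Spec_find (parent : List (Int × List Int)) (city : Int) (lst : List Int) (min_path : Int) (edge_list : List (Int × Int × Int × Int)) (out : Int) : Prop := out = find_alt parent city lst min_path edge_list
instance (parent : List (Int × List Int)) (city : Int) (lst : List Int) (min_path : Int) (edge_list : List (Int × Int × Int × Int)) (out : Int) : Decidable (Spec_find parent city lst min_path edge_list out) := by unfold Spec_find; infer_instance

-- ===== CLAIM (what is proved, stated in full; the proofs are below) =====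
def Claim_equal_find : Prop := ∀ (parent : List (Int × List Int)) (city : Int) (lst : List Int) (min_path : Int) (edge_list : List (Int × Int × Int × Int)), Dom_find parent city lst min_path edge_list → Pre_find parent city lst min_path edge_list → Spec_find parent city lst min_path edge_list (find parent city lst min_path edge_list)

-- ===== LEMMAS AND PROOFS =====

theorem pvWitness_ok : Dom_find (pvWitness_find.1) (pvWitness_find.2.1) (pvWitness_find.2.2.1) (pvWitness_find.2.2.2.1) (pvWitness_find.2.2.2.2) ∧ Pre_find (pvWitness_find.1) (pvWitness_find.2.1) (pvWitness_find.2.2.1) (pvWitness_find.2.2.2.1) (pvWitness_find.2.2.2.2) := by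
  constructor <;> decide

theorem int_min_eq (a b : Int) : min a b = if b < a then b else a := by
  rw [Int.min_def]; split_ifs <;> omega

theorem loop_eq (parent : List (Int × List Int)) (edge_list : List (Int × Int × Int × Int)) :
    ∀ (fuel : Nat) (city : Int) (lst : List Int) (min_path : Int),
      chainOk parent edge_list fuel city = true →
      findLoopB (PySem.Dict.mk parent) edge_list fuel city lst min_path
        = some (findA fuel parent city lst min_path edge_list) := by
  intro fuel
  induction fuel with
  | zero => intro city lst min_path h; simp [chainOk] at h
  | succ fuel ih =>
    intro city lst min_path h
    unfold chainOk at h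
    unfold findLoopB findA
    cases hget : (PySem.Dict.mk parent).get? city with
    | none => simp only [hget] at h; simp at h
    | some row =>
      simp only [hget] at h
      simp only [Option.bind_some]
      cases h0 : PySem.List.pyGet? row 0 with
      | none => simp only [h0] at h; simp at h
      | some p =>
        simp only [h0] at h
        by_cases hpc : p = city
        · simp [hpc]
        · simp only [beq_iff_eq, hpc, if_false] at h
          simp only [beq_iff_eq, bne_iff_ne, ne_eq, hpc, not_false_iff, if_true, if_false]
          cases h1 : PySem.List.pyGet? row 1 with
          | none => simp only [h1] at h; simp at h
          | some e =>
            simp only [h1] at h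
            cases hel : PySem.List.pyGet? edge_list e with
            | none => simp only [hel] at h; simp at h
            | some t =>
              simp only [hel, Option.isSome_some, Bool.true_and] at h
              obtain ⟨u, v, l, c⟩ := t
              simp only [hel, Option.map_some]
              rw [int_min_eq]
              exact ih p (lst ++ [e]) (if c < min_path then c else min_path) h

-- ===== VERDICT (by name: the statement is the Claim_ definition above) =====
theorem find_spec : Claim_equal_find := by
  intro parent city lst min_path edge_list _hdom hpre
  unfold Spec_find find find_alt
  rw [loop_eq parent edge_list (parent.length + 1) city lst min_path hpre]
  rfl
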